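-- pv_equiv track=rewrite | github.com/serrasqueiro/pdixit | src/packages/pwh/luxperm.py | permissions_to_unix_string
-- ===== SOURCE A (Python) =====
-- import stat
--
-- def permissions_to_unix_string(st_mode) -> str:
--     # pylint: disable=line-too-long
--     """
--     :param st_mode: Unix status, provided by POSIX lstat() or stat()
--     :return: string
--
--     see also https://stackoverflow.com/questions/17809386/how-to-convert-a-stat-output-to-a-unix-permissions-string/17810089
--     """
--     permstr = ''
--     usertypes = ['USR', 'GRP', 'OTH']
--     for usertype in usertypes:
--         perm_types = ['R', 'W', 'X']
--         for permtype in perm_types: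
--             perm = getattr(stat, 'S_I%s%s' % (permtype, usertype))
--             if st_mode & perm:
--                 permstr += permtype.lower()
--             else:
--                 permstr += '-'
--     return permstr
-- ===== SOURCE B (Python) =====
-- def permissions_to_unix_string(st_mode) -> str:
--     return ''.join(c if st_mode & (1 << (8 - i)) else '-'
--                    for i, c in enumerate('rwxrwxrwx'))
-- ===== Notes on version B (the rewrite author's own statement) =====
-- stated objective: idiomatic
-- what changed: Replaces the nested USR/GRP/OTH x R/W/X loops with stat-constant getattr lookups and string accumulation by a single flat pass over the template string of permission letters, testing each bit with a shift and joining the resulting characters.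
import Mathlib
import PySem

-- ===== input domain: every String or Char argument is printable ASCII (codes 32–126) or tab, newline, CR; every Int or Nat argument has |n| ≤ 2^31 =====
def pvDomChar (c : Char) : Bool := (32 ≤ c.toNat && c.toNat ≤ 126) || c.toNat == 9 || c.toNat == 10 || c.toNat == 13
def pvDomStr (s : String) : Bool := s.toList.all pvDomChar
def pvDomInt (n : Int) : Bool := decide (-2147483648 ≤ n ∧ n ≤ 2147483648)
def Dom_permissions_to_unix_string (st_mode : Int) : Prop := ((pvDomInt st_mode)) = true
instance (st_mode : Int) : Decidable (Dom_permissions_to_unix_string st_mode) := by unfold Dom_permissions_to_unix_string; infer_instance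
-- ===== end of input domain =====

-- B replaces the nested stat-constant loops with a single flat pass over the template "rwxrwxrwx" using bit shifts (idiomatic).
-- ===== PORT A =====
-- getattr(stat, 'S_I%s%s' % (permtype, usertype)): the stat-module constant values, spelled out
def statConst (permtype usertype : String) : Int :=
  match permtype, usertype with
  | "R", "USR" => 256 | "W", "USR" => 128 | "X", "USR" => 64
  | "R", "GRP" => 32  | "W", "GRP" => 16  | "X", "GRP" => 8
  | "R", "OTH" => 4   | "W", "OTH" => 2   | "X", "OTH" => 1
  | _, _ => 0

def permissions_to_unix_string (st_mode : Int) : String :=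
  let permstr := ""
  let usertypes := ["USR", "GRP", "OTH"]
  usertypes.foldl (fun permstr usertype =>
    let perm_types := ["R", "W", "X"]
    perm_types.foldl (fun permstr permtype =>
      let perm := statConst permtype usertype
      if PySem.Int.band st_mode perm ≠ 0 then permstr ++ PySem.Str.lower permtype
      else permstr ++ "-") permstr) permstr

-- ===== PORT B =====
def permissions_to_unix_string_alt (st_mode : Int) : String :=
  String.ofList ((PySem.List.enumerate "rwxrwxrwx".toList).map (fun ic =>
    if PySem.Int.band st_mode ((1 <<< (8 - ic.1).toNat : Nat) : Int) ≠ 0 then ic.2 else '-'))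

-- ===== PRECONDITION & SPEC =====
def Spec_permissions_to_unix_string (st_mode : Int) (out : String) : Prop := out = permissions_to_unix_string_alt st_mode
instance (st_mode : Int) (out : String) : Decidable (Spec_permissions_to_unix_string st_mode out) := by unfold Spec_permissions_to_unix_string; infer_instance

-- ===== CLAIM (what is proved, stated in full; the proofs are below) =====
def Claim_equal_permissions_to_unix_string : Prop := ∀ (st_mode : Int), Dom_permissions_to_unix_string st_mode → Spec_permissions_to_unix_string st_mode (permissions_to_unix_string st_mode)

-- ===== LEMMAS AND PROOFS =====

-- (if c then [a] else [b]) = [if c then a else b], pushing a singleton list through an if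
theorem pvIteSingleton {c : Prop} [Decidable c] (a b : Char) :
    (if c then [a] else [b]) = [if c then a else b] := by split_ifs <;> rfl

-- push an if inside a cons when both branches share the head
theorem pvIteCons {c : Prop} [Decidable c] (x : Char) (xs ys : List Char) :
    (if c then x :: xs else x :: ys) = x :: (if c then xs else ys) := by
  split_ifs <;> rfl

-- ===== VERDICT (by name: the statement is the Claim_ definition above) =====
theorem permissions_to_unix_string_spec : Claim_equal_permissions_to_unix_string := by
  intro st_mode _
  unfold Spec_permissions_to_unix_string permissions_to_unix_string permissions_to_unix_string_alt
  rw [← String.toList_inj,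
    show "rwxrwxrwx".toList = ['r','w','x','r','w','x','r','w','x'] from rfl]
  simp only [List.foldl_cons, List.foldl_nil, statConst,
    PySem.List.enumerate_cons, PySem.List.enumerate_nil, List.map_cons, List.map_nil,
    show ((1 <<< (8 - (0:Int)).toNat : Nat) : Int) = 256 from rfl,
    show ((1 <<< (8 - (0+1:Int)).toNat : Nat) : Int) = 128 from rfl,
    show ((1 <<< (8 - (0+1+1:Int)).toNat : Nat) : Int) = 64 from rfl,
    show ((1 <<< (8 - (0+1+1+1:Int)).toNat : Nat) : Int) = 32 from rfl,
    show ((1 <<< (8 - (0+1+1+1+1:Int)).toNat : Nat) : Int) = 16 from rfl,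
    show ((1 <<< (8 - (0+1+1+1+1+1:Int)).toNat : Nat) : Int) = 8 from rfl,
    show ((1 <<< (8 - (0+1+1+1+1+1+1:Int)).toNat : Nat) : Int) = 4 from rfl,
    show ((1 <<< (8 - (0+1+1+1+1+1+1+1:Int)).toNat : Nat) : Int) = 2 from rfl,
    show ((1 <<< (8 - (0+1+1+1+1+1+1+1+1:Int)).toNat : Nat) : Int) = 1 from rfl,
    String.toList_append, String.toList_ofList, apply_ite String.toList,
    show (PySem.Str.lower "R").toList = ['r'] from rfl,
    show (PySem.Str.lower "W").toList = ['w'] from rfl,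
    show (PySem.Str.lower "X").toList = ['x'] from rfl,
    show ("-" : String).toList = ['-'] from rfl,
    show ("" : String).toList = ([] : List Char) from rfl,
    pvIteSingleton, pvIteCons, List.nil_append, List.cons_append]
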